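-- pv_equiv track=rewrite | github.com/Rajasekhar1131997/TIP102_Sessions | Week2Session1_SPSV1.py | num_popular_pairs
-- ===== SOURCE A (Python) =====
-- def num_popular_pairs(popularity_scores):
--     frequency = {}
--     for score in popularity_scores:
--         frequency[score] = frequency.get(score, 0) + 1
--     total_pairs = 0
--     for value in frequency.values():
--         if value> 1:
--             total_pairs += (value * (value-1)//2)
--     return total_pairs
-- ===== SOURCE B (Python) =====
-- def num_popular_pairs(popularity_scores):
--     freq = {}
--     total_pairs = 0
--     for score in popularity_scores:
--         seen = freq.get(score, 0)
--         total_pairs += seen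
--         freq[score] = seen + 1
--     return total_pairs
-- ===== Notes on version B (the rewrite author's own statement) =====
-- stated objective: alternative
-- what changed: B accumulates pairs incrementally in a single pass (each occurrence adds the number of equal scores seen so far), eliminating A's second loop over frequency.values() and the closed-form k*(k-1)//2.
import Mathlib
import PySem

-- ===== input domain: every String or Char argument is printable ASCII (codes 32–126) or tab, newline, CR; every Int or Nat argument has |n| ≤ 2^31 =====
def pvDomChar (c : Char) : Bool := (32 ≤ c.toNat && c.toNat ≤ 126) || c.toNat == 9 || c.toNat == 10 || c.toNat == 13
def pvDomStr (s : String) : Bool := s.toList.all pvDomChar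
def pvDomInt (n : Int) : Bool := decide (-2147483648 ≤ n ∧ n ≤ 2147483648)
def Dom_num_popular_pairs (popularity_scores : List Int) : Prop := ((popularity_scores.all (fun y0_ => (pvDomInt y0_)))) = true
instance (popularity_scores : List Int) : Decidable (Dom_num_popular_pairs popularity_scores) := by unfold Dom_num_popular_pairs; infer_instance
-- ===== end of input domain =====

-- B replaces A's two-phase count-then-sum-C(k,2) with a single pass that adds, for each
-- score, the number of equal scores already seen (alternative decomposition, same O(n) cost).

-- ===== PORT A =====
def num_popular_pairs (popularity_scores : List Int) : Int :=
  let frequency : PySem.Dict Int Int :=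
    popularity_scores.foldl (fun d score => d.insert score (d.getD score 0 + 1)) PySem.Dict.empty
  frequency.values.foldl
    (fun total_pairs value =>
      if value > 1 then total_pairs + PySem.Int.floordiv (value * (value - 1)) 2 else total_pairs) 0

-- ===== PORT B =====
def num_popular_pairs_alt (popularity_scores : List Int) : Int :=
  (popularity_scores.foldl
    (fun st score =>
      let seen := st.1.getD score 0
      (st.1.insert score (seen + 1), st.2 + seen))
    ((PySem.Dict.empty : PySem.Dict Int Int), (0 : Int))).2

-- ===== PRECONDITION & SPEC =====
def Spec_num_popular_pairs (popularity_scores : List Int) (out : Int) : Prop := out = num_popular_pairs_alt popularity_scores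
instance (popularity_scores : List Int) (out : Int) : Decidable (Spec_num_popular_pairs popularity_scores out) := by unfold Spec_num_popular_pairs; infer_instance

-- ===== CLAIM (what is proved, stated in full; the proofs are below) =====
def Claim_equal_num_popular_pairs : Prop := ∀ (popularity_scores : List Int), Dom_num_popular_pairs popularity_scores → Spec_num_popular_pairs popularity_scores (num_popular_pairs popularity_scores)

-- ===== LEMMAS AND PROOFS =====

-- g n = A's contribution of one frequency value n
def pvG (n : Int) : Int := if n > 1 then PySem.Int.floordiv (n * (n - 1)) 2 else 0

-- the common closed form both sides are reduced to
def pvS (xs : List Int) : Int :=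
  ((PySem.Set.ofList xs).map (fun k => pvG (xs.count k))).sum

lemma pvA_eq_S (xs : List Int) : num_popular_pairs xs = pvS xs := by
  unfold num_popular_pairs pvS
  rw [PySem.Dict.foldl_insert_getD_add_one_eq_counter]
  have hv : (PySem.Dict.counter xs).values
      = (PySem.Set.ofList xs).map (fun k => ((xs.count k : Nat) : Int)) := by
    simp only [PySem.Dict.values, PySem.Dict.items_counter, List.map_map]
    rfl
  show (List.foldl
      (fun total_pairs value =>
        if value > 1 then total_pairs + PySem.Int.floordiv (value * (value - 1)) 2 else total_pairs)
      0 (PySem.Dict.counter xs).values) = _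
  rw [hv]
  have hcong : List.foldl
      (fun total_pairs value =>
        if value > 1 then total_pairs + PySem.Int.floordiv (value * (value - 1)) 2 else total_pairs)
      0 ((PySem.Set.ofList xs).map (fun k => ((xs.count k : Nat) : Int)))
      = List.foldl (fun acc v => acc + pvG v)
      0 ((PySem.Set.ofList xs).map (fun k => ((xs.count k : Nat) : Int))) :=
    PySem.List.foldl_congr_mem _ _ _ _ (by intro acc v _; unfold pvG; split_ifs <;> simp)
  rw [hcong, PySem.List.foldl_add]
  simp [List.map_map, Function.comp_def]

lemma pvG_step (n : Int) (hn : 1 ≤ n) : pvG (n + 1) = pvG n + n := by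
  obtain ⟨m', hm'⟩ := Int.even_mul_succ_self n
  obtain ⟨m, hm⟩ := Int.even_mul_succ_self (n - 1)
  have hm'2 : (n + 1) * n = 2 * m' := by rw [mul_comm]; omega
  have hm2 : n * (n - 1) = 2 * m := by
    have : (n - 1) * (n - 1 + 1) = n * (n - 1) := by ring
    omega
  have hmn : m' = m + n := by
    have h2 : 2 * m' = 2 * m + 2 * n := by
      rw [← hm'2, ← hm2]; ring
    omega
  unfold pvG
  rw [if_pos (by omega : n + 1 > 1)]
  rw [show n + 1 - 1 = n by ring, hm'2, PySem.Int.floordiv_eq_ediv_of_pos (by norm_num),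
      Int.mul_ediv_cancel_left _ (by norm_num)]
  by_cases h1 : n > 1
  · rw [if_pos h1, hm2, PySem.Int.floordiv_eq_ediv_of_pos (by norm_num),
        Int.mul_ediv_cancel_left _ (by norm_num)]
    omega
  · have hn1 : n = 1 := by omega
    rw [if_neg h1]
    have : m = 0 := by rw [hn1] at hm2; omega
    omega

-- only the x-entry of a sum over nodup keys changes: the sum moves by c
lemma pvSum_update (l : List Int) (x : Int) (c : Int) (F G : Int → Int)
    (hnd : l.Nodup) (hx : x ∈ l)
    (hFG : ∀ k ∈ l, k ≠ x → F k = G k) (hc : F x = G x + c) :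
    (l.map F).sum = (l.map G).sum + c := by
  induction l with
  | nil => cases hx
  | cons a t ih =>
    rcases List.mem_cons.mp hx with rfl | hxt
    · have ht : ∀ k ∈ t, F k = G k := by
        intro k hk
        exact hFG k (List.mem_cons_of_mem _ hk) (by rintro rfl; exact (List.nodup_cons.mp hnd).1 hk)
      simp only [List.map_cons, List.sum_cons, hc,
        List.map_congr_left ht]
      ring
    · have ha : F a = G a := by
        refine hFG a (List.mem_cons_self) ?_
        rintro rfl; exact (List.nodup_cons.mp hnd).1 hxt
      have := ih (List.nodup_cons.mp hnd).2 hxt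
        (fun k hk hkx => hFG k (List.mem_cons_of_mem _ hk) hkx)
      simp only [List.map_cons, List.sum_cons, ha, this]
      ring

lemma pvS_append (xs : List Int) (x : Int) :
    pvS (xs ++ [x]) = pvS xs + xs.count x := by
  unfold pvS
  have hset : PySem.Set.ofList (xs ++ [x])
      = if PySem.Set.contains (PySem.Set.ofList xs) x then PySem.Set.ofList xs
        else PySem.Set.ofList xs ++ [x] := by
    simp [PySem.Set.ofList_eq_foldl, PySem.Set.add]
  by_cases hx : x ∈ xs
  · have hc : PySem.Set.contains (PySem.Set.ofList xs) x = true := by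
      simp [PySem.Set.contains, PySem.Set.mem_ofList, hx]
    rw [hset, if_pos hc]
    refine pvSum_update _ x _ _ _ (PySem.Set.nodup_ofList xs)
      ((PySem.Set.mem_ofList xs x).mpr hx) ?_ ?_
    · intro k _ hkx
      have : (xs ++ [x]).count k = xs.count k := by
        simp [List.count_append, Ne.symm hkx]
      rw [this]
    · have hcnt : (xs ++ [x]).count x = xs.count x + 1 := by
        simp [List.count_append]
      rw [hcnt]
      push_cast
      exact pvG_step _ (by exact_mod_cast Nat.one_le_iff_ne_zero.mpr (by simpa using List.count_pos_iff.mpr hx |>.ne'))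
  · have hc : PySem.Set.contains (PySem.Set.ofList xs) x = false := by
      simp [PySem.Set.contains, PySem.Set.mem_ofList, hx]
    rw [hset, if_neg (by simp [PySem.Set.contains, PySem.Set.mem_ofList, hx] )]
    have hcx : (xs ++ [x]).count x = 1 := by
      simp [List.count_append, List.count_eq_zero_of_not_mem hx]
    have hmap : (PySem.Set.ofList xs).map (fun k => pvG ((xs ++ [x]).count k))
        = (PySem.Set.ofList xs).map (fun k => pvG (xs.count k)) := by
      refine List.map_congr_left ?_
      intro k hk
      have hkx : k ≠ x := by
        rintro rfl; exact hx ((PySem.Set.mem_ofList xs k).mp hk)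
      simp [List.count_append, Ne.symm hkx]
    rw [List.map_append, List.sum_append, hmap]
    simp [pvG, List.count_eq_zero_of_not_mem hx]

lemma pvB_state (xs : List Int) :
    (xs.foldl (fun st score =>
      let seen := st.1.getD score 0
      (st.1.insert score (seen + 1), st.2 + seen))
      ((PySem.Dict.empty : PySem.Dict Int Int), (0 : Int))) =
    (PySem.Dict.counter xs, pvS xs) := by
  induction xs using List.reverseRecOn with
  | nil => rfl
  | append_singleton t x ih =>
    rw [List.foldl_append, ih]
    simp only [List.foldl_cons, List.foldl_nil]
    refine Prod.ext ?_ ?_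
    · show (PySem.Dict.counter t).insert x ((PySem.Dict.counter t).getD x 0 + 1)
        = PySem.Dict.counter (t ++ [x])
      rw [PySem.Dict.counter_append_singleton]
      exact (PySem.Dict.ext_iff.mpr rfl).symm
    · show pvS t + (PySem.Dict.counter t).getD x 0 = pvS (t ++ [x])
      rw [PySem.Dict.getD_counter, pvS_append]

-- ===== VERDICT (by name: the statement is the Claim_ definition above) =====
theorem num_popular_pairs_spec : Claim_equal_num_popular_pairs := by
  intro xs _
  unfold Spec_num_popular_pairs num_popular_pairs_alt
  rw [pvB_state, pvA_eq_S]
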